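-- pv_equiv track=rewrite | github.com/Siddh7-ai/Phising_Detection | ai/features.py | is_country_tld
-- ===== SOURCE A (Python) =====
-- COUNTRY_TLDS = [
--     '.in', '.uk', '.us', '.ca', '.au', '.de', '.fr', '.jp', '.cn',
--     '.br', '.ru', '.it', '.es', '.nl', '.se', '.ch', '.no', '.dk',
-- ]
--
-- def is_country_tld(url: str) -> int:
--     """Check if URL uses a country-code TLD."""
--     url_lower = url.lower()
--     for tld in COUNTRY_TLDS:
--         if (url_lower.endswith(tld)
--                 or tld + '/' in url_lower
--                 or tld + '?' in url_lower):
--             return 1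
--     return 0
-- ===== SOURCE B (Python) =====
-- _CC_CODES = frozenset("in uk us ca au de fr jp cn br ru it es nl se ch no dk".split())
--
-- def _hit(w):
--     # w is a window u[i:i+4] (length <= 4): '.', a 2-letter code, then '/', '?' or nothing
--     return (len(w) >= 3 and w[0] == '.' and w[1:3] in _CC_CODES
--             and (len(w) == 3 or w[3] == '/' or w[3] == '?'))
--
-- def is_country_tld(url: str) -> int:
--     """Check if URL uses a country-code TLD (single scan over 4-char windows)."""
--     u = url.lower()
--     return 1 if any(_hit(u[i:i + 4]) for i in range(len(u) + 1)) else 0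
-- ===== Notes on version B (the rewrite author's own statement) =====
-- stated objective: alternative
-- what changed: Replaces A's per-TLD loop of endswith/substring scans (up to 54 passes over the URL) by a single left-to-right scan that tests each 4-char window for '.' + a 2-letter country code from one set + '/', '?' or end of string.
import Mathlib
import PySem

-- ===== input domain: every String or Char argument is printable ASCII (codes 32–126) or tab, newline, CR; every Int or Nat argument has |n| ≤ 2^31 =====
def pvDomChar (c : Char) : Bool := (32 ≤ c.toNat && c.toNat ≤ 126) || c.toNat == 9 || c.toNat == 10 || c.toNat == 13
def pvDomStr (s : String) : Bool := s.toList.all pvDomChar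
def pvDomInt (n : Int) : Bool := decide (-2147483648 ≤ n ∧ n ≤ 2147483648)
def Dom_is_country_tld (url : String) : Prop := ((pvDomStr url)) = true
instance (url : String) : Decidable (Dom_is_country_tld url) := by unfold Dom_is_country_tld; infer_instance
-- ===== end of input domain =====

-- B replaces A's per-TLD loop of endswith/substring scans by one left-to-right scan
-- over 4-char windows ('.' + two-letter code + '/', '?' or end); alternative
-- decomposition with the same exact return value.


-- ===== PORT A =====
-- module constant COUNTRY_TLDS
def pvCountryTlds : List (List Char) :=
  [['.', 'i', 'n'], ['.', 'u', 'k'], ['.', 'u', 's'], ['.', 'c', 'a'], ['.', 'a', 'u'],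
   ['.', 'd', 'e'], ['.', 'f', 'r'], ['.', 'j', 'p'], ['.', 'c', 'n'], ['.', 'b', 'r'],
   ['.', 'r', 'u'], ['.', 'i', 't'], ['.', 'e', 's'], ['.', 'n', 'l'], ['.', 's', 'e'],
   ['.', 'c', 'h'], ['.', 'n', 'o'], ['.', 'd', 'k']]

-- A: 'for tld in COUNTRY_TLDS: if endswith or "tld/" in u or "tld?" in u: return 1' / 'return 0'
def is_country_tld (url : String) : Int :=
  let u := PySem.Chars.lower url.toList
  if pvCountryTlds.any (fun tld =>
      PySem.Chars.endswith u tld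
      || PySem.Chars.isIn (tld ++ ['/']) u
      || PySem.Chars.isIn (tld ++ ['?']) u)
  then 1 else 0

-- ===== PORT B =====
-- B's constant: _CC_CODES = frozenset("in uk ...".split()), the two-letter codes
def pvCodes : List (List Char) :=
  PySem.Chars.split₀ "in uk us ca au de fr jp cn br ru it es nl se ch no dk".toList

-- B's _hit(w): len(w)>=3 and w[0]=='.' and w[1:3] in codes and (len(w)==3 or w[3] in {'/','?'})
def pvHit (w : List Char) : Bool :=
  match w with
  | c :: a :: b :: rest =>
      c == '.' && pvCodes.contains [a, b]
        && (rest.isEmpty || rest.head? == some '/' || rest.head? == some '?')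
  | _ => false

-- B: any(_hit(u[i:i+4]) for i in range(len(u)+1)); u[i:i+4] = (u.drop i).take 4,
-- and the drops for i = 0..len(u) are exactly u.tails
def is_country_tld_alt (url : String) : Int :=
  if (PySem.Chars.lower url.toList).tails.any (fun s => pvHit (s.take 4)) then 1 else 0

-- ===== PRECONDITION & SPEC =====
def Spec_is_country_tld (url : String) (out : Int) : Prop := out = is_country_tld_alt url
instance (url : String) (out : Int) : Decidable (Spec_is_country_tld url out) := by unfold Spec_is_country_tld; infer_instance

-- ===== CLAIM =====
def Claim_equal_is_country_tld : Prop := ∀ (url : String), Dom_is_country_tld url → Spec_is_country_tld url (is_country_tld url)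

-- ===== LEMMAS AND PROOFS =====

-- A's triples are exactly '.' prepended to B's two-letter codes
lemma pvTlds_eq_map : pvCountryTlds = pvCodes.map (fun c => '.' :: c) := by decide

lemma pvMem_tlds_iff (a b : Char) :
    ['.', a, b] ∈ pvCountryTlds ↔ [a, b] ∈ pvCodes := by
  rw [pvTlds_eq_map, List.mem_map]
  constructor
  · rintro ⟨c, hc, heq⟩
    cases heq
    exact hc
  · intro h; exact ⟨[a, b], h, rfl⟩

lemma pvTld_shape : ∀ t ∈ pvCountryTlds, ∃ a b, t = ['.', a, b] := by
  intro t ht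
  rw [pvTlds_eq_map, List.mem_map] at ht
  obtain ⟨c, hc, rfl⟩ := ht
  have : c.length = 2 := by
    revert hc
    have : ∀ c ∈ pvCodes, c.length = 2 := by decide
    exact this c
  match c, this with
  | [a, b], _ => exact ⟨a, b, rfl⟩

-- the shared semantic characterization: some TLD occurs followed by '/', '?' or end
def pvGood (u : List Char) : Prop :=
  ∃ t ∈ pvCountryTlds, t <:+ u ∨ (t ++ ['/']) <:+: u ∨ (t ++ ['?']) <:+: u

-- A side: A's any-test is pvGood
lemma pvA_iff (u : List Char) :
    (pvCountryTlds.any (fun tld =>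
      PySem.Chars.endswith u tld
      || PySem.Chars.isIn (tld ++ ['/']) u
      || PySem.Chars.isIn (tld ++ ['?']) u) = true) ↔ pvGood u := by
  simp only [pvGood, List.any_eq_true, Bool.or_eq_true, PySem.Chars.endswith_iff,
    PySem.Chars.isIn_iff_infix, or_assoc]

-- pvHit on the window of a suffix of the form '.' a b (m :: tail) with m ∈ {'/','?'}
lemma pvHit_marker (a b m : Char) (tl : List Char)
    (hab : [a, b] ∈ pvCodes) (hm : m = '/' ∨ m = '?') :
    pvHit (('.' :: a :: b :: m :: tl).take 4) = true := by
  have : ('.' :: a :: b :: m :: tl).take 4 = ['.', a, b, m] := by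
    simp [List.take]
  rw [this]
  rcases hm with rfl | rfl <;> simp [pvHit, hab]

-- B side: B's any-over-windows test is pvGood
lemma pvB_iff (u : List Char) :
    (u.tails.any (fun s => pvHit (s.take 4)) = true) ↔ pvGood u := by
  rw [List.any_eq_true]
  constructor
  · rintro ⟨s, hs, hhit⟩
    rw [List.mem_tails] at hs
    match s, hhit with
    | c :: a :: b :: rest, hhit =>
      have hw : (c :: a :: b :: rest).take 4 = c :: a :: b :: rest.take 1 := by
        simp [List.take]
      rw [hw] at hhit
      simp only [pvHit, Bool.and_eq_true, Bool.or_eq_true, beq_iff_eq] at hhit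
      obtain ⟨⟨rfl, hab⟩, hend⟩ := hhit
      have hmem : [a, b] ∈ pvCodes := by simpa using hab
      refine ⟨['.', a, b], (pvMem_tlds_iff a b).mpr hmem, ?_⟩
      match rest, hend with
      | [], _ =>
        exact Or.inl hs
      | d :: tl, hend =>
        have hd : d = '/' ∨ d = '?' := by
          rcases hend with (h | h) | h
          · exact absurd h (by simp [List.isEmpty])
          · left; simpa [List.head?] using h
          · right; simpa [List.head?] using h
        have hinf : ['.', a, b, d] <:+: u := by
          obtain ⟨pre, hpre⟩ := hs
          exact ⟨pre, tl, by rw [← hpre]; simp⟩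
        rcases hd with rfl | rfl
        · exact Or.inr (Or.inl hinf)
        · exact Or.inr (Or.inr hinf)
  · rintro ⟨t, ht, hcase⟩
    obtain ⟨a, b, rfl⟩ := pvTld_shape t ht
    have hab : [a, b] ∈ pvCodes := (pvMem_tlds_iff a b).mp ht
    rcases hcase with hsuf | hinf | hinf
    · refine ⟨['.', a, b], (List.mem_tails _ _).mpr hsuf, ?_⟩
      simp [pvHit, hab, List.take]
    · obtain ⟨pre, post, hsplit⟩ := hinf
      refine ⟨'.' :: a :: b :: '/' :: post, (List.mem_tails _ _).mpr ⟨pre, by rw [← hsplit]; simp⟩, ?_⟩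
      exact pvHit_marker a b '/' post hab (Or.inl rfl)
    · obtain ⟨pre, post, hsplit⟩ := hinf
      refine ⟨'.' :: a :: b :: '?' :: post, (List.mem_tails _ _).mpr ⟨pre, by rw [← hsplit]; simp⟩, ?_⟩
      exact pvHit_marker a b '?' post hab (Or.inr rfl)

-- ===== VERDICT =====
theorem is_country_tld_spec : Claim_equal_is_country_tld := by
  intro url _
  unfold Spec_is_country_tld is_country_tld is_country_tld_alt
  set u := PySem.Chars.lower url.toList with hu
  by_cases h : pvGood u
  · rw [if_pos ((pvA_iff u).mpr h), if_pos ((pvB_iff u).mpr h)]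
  · rw [if_neg (fun hc => h ((pvA_iff u).mp hc)),
        if_neg (fun hc => h ((pvB_iff u).mp hc))]
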